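-- pv_equiv track=rewrite | github.com/tyrakriv/2019Spring-CPE202Projects | conversions/perm_lex.py | perm_gen_lex
-- ===== SOURCE A (Python) =====
-- def perm_gen_lex(a):
--     #makes an empty, new list
--     perm_list = []
--
--     #tests if string contains no characters
--     if a == '':
--         return []
--
--     #tests if string only contains one character and returns character
--     if len(a) == 1:
--         return [a]
--
--     #goes through every character in the string
--     for i in range(len(a)):
--
--         #creates a shorter string without a character
--         simple = a.replace(a[i],"")
--
--         #calls function again to shorten the string until one character is left
--         short = perm_gen_lex(simple)
--
--         #for every character the first for loop goes through, the second will append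
--         #the new string into the perm_list to store
--         for j in short:
--             perm_list.append(a[i] + j)
--
--     #perm_list is returned at the very end of the function
--     return (perm_list)
-- ===== SOURCE B (Python) =====
-- def perm_gen_lex(a):
--     # Iterative DFS with an explicit stack of (prefix, remaining) states
--     # instead of recursion; same replace-all-occurrences child construction.
--     out = []
--     stack = [("", a)]
--     while stack:
--         prefix, rem = stack.pop()
--         if rem == "":
--             continue
--         if len(rem) == 1:
--             out.append(prefix + rem)
--             continue
--         # push children in reversed index order so pop order is left-to-right
--         for i in reversed(range(len(rem))):
--             stack.append((prefix + rem[i], rem.replace(rem[i], "")))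
--     return out
-- ===== Notes on version B (the rewrite author's own statement) =====
-- stated objective: alternative
-- what changed: Replaces A's recursion with an iterative depth-first search over an explicit stack of (prefix, remaining) states, pushing children in reversed index order so pop order reproduces A's output order exactly (including the replace-all-occurrences child construction on duplicate characters).
import Mathlib
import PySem

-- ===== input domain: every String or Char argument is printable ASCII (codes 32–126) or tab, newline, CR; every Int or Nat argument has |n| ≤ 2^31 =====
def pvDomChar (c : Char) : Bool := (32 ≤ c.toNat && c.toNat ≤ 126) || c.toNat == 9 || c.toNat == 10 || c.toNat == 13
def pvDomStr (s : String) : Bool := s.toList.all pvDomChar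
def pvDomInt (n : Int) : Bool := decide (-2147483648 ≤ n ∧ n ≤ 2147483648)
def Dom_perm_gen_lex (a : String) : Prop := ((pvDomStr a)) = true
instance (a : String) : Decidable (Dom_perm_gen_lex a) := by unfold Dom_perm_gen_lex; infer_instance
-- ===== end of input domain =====

-- B replaces A's recursion by an explicit stack of (prefix, remaining) states (iterative DFS);
-- same results in the same order, no speed claim.

-- Removing all occurrences of a character that is present strictly shortens the list
-- (termination fact for both ports; cited in their decreasing_by).
theorem pvFilterLen_lt (l : List Char) (c : Char) (hc : c ∈ l) :
    (l.filter (fun x => !(x == c))).length < l.length := by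
  induction l with
  | nil => cases hc
  | cons a t ih =>
    simp only [List.filter_cons]
    rcases List.mem_cons.mp hc with rfl | hm
    · simp only [beq_self_eq_true, Bool.not_true, List.length_cons]
      exact Nat.lt_succ_of_le (List.length_filter_le _ _)
    · by_cases hp : (!(a == c)) = true
      · simp only [hp, List.length_cons]
        exact Nat.succ_lt_succ (ih hm)
      · simp only [hp, List.length_cons]
        exact Nat.lt_succ_of_lt (ih hm)

-- ===== PORT A =====
-- A works on the character list of the string; `a.replace(a[i], "")` removes EVERY occurrence
-- of the i-th character, which on a list of characters is exactly `filter (x ≠ a[i])`;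
-- `for i in range(len(a))` with only `a[i]` used is the fold over the characters themselves
-- (attach carries the membership needed for termination).
def permAux (l : List Char) : List (List Char) :=
  if l = [] then []                    -- if a == '': return []
  else if l.length = 1 then [l]        -- if len(a) == 1: return [a]
  else
    l.attach.foldl                     -- perm_list = []; for i in range(len(a)): ...
      (fun acc c =>
        acc ++ (permAux (l.filter (fun x => !(x == c.val)))).map (fun j => c.val :: j))
      []
termination_by l.length
decreasing_by
  rw [List.unattach_filter (g := fun x => !(x == c.val)) (hf := fun x h => rfl), List.unattach_attach]
  exact pvFilterLen_lt l c.val c.property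

def perm_gen_lex (a : String) : List String :=
  (permAux a.toList).map String.ofList

-- ===== PORT B =====
-- weight of a stack entry, used only for termination of the stack loop
def pvW (n : Nat) : Nat := n.factorial * 2 ^ n

theorem pvW_mono {m n : Nat} (h : m ≤ n) : pvW m ≤ pvW n :=
  Nat.mul_le_mul (Nat.factorial_le h) (Nat.pow_le_pow_right (by norm_num) h)

-- the children pushed for one popped state weigh strictly less than the state itself
theorem pvW_pos (m : Nat) : 1 ≤ pvW m :=
  Nat.one_le_iff_ne_zero.mpr (Nat.mul_ne_zero (Nat.factorial_ne_zero m) (Nat.pow_pos (by norm_num)).ne')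

theorem pvW_succ (m : Nat) : pvW (m + 1) = 2 * (m + 1) * pvW m := by
  simp [pvW, Nat.factorial_succ, pow_succ]; ring

theorem pvArith (m : Nat) : (m + 1) * (pvW m + 1) < pvW (m + 1) + 1 := by
  have h1 := pvW_pos m
  rw [pvW_succ]
  nlinarith

-- Iterative DFS: pop (prefix, remaining); empty remainder yields nothing, a single character
-- is emitted, otherwise the children (prefix+rem[i], rem.replace(rem[i], "")) are pushed in
-- reversed index order — so the pop order is index order, i.e. the new stack is children ++ rest.
def permStack : List (List Char × List Char) → List (List Char) → List (List Char)
  | [], out => out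
  | (p, r) :: st, out =>
    if r = [] then permStack st out
    else if r.length = 1 then permStack st (out ++ [p ++ r])
    else permStack ((r.map (fun c => (p ++ [c], r.filter (fun x => !(x == c))))) ++ st) out
termination_by st _ => (st.map (fun s => pvW s.2.length + 1)).sum
decreasing_by
  · simp only [List.map_cons, List.sum_cons]; omega
  · simp only [List.map_cons, List.sum_cons]; omega
  · rename_i h0 _
    simp only [List.map_append, List.sum_append, List.map_cons, List.sum_cons, List.map_map]
    obtain ⟨m, hm⟩ : ∃ m, r.length = m + 1 :=
      ⟨r.length - 1, by have := List.length_pos_of_ne_nil h0; omega⟩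
    apply Nat.add_lt_add_right
    rw [hm, Nat.lt_succ_iff]
    refine le_trans (List.sum_le_card_nsmul _ (pvW m + 1) ?_) ?_
    · intro y hy
      obtain ⟨c, _, rfl⟩ := List.mem_map.mp hy
      dsimp only [Function.comp_apply]
      rw [List.unattach_filter (g := fun x => !(x == c.val)) (hf := fun x h => rfl),
        List.unattach_attach]
      have hlt := pvFilterLen_lt r c.val c.property
      exact Nat.succ_le_succ (pvW_mono (by omega))
    · rw [List.length_map, List.length_attach, hm, smul_eq_mul]
      exact Nat.lt_succ_iff.mp (pvArith m)
def perm_gen_lex_alt (a : String) : List String :=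
  (permStack [(([] : List Char), a.toList)] []).map String.ofList

-- ===== PRECONDITION & SPEC =====
def Spec_perm_gen_lex (a : String) (out : List String) : Prop := out = perm_gen_lex_alt a
instance (a : String) (out : List String) : Decidable (Spec_perm_gen_lex a out) := by unfold Spec_perm_gen_lex; infer_instance

-- ===== CLAIM (what is proved, stated in full; the proofs are below) =====
def Claim_equal_perm_gen_lex : Prop := ∀ (a : String), Dom_perm_gen_lex a → Spec_perm_gen_lex a (perm_gen_lex a)

-- ===== LEMMAS AND PROOFS =====

-- A's node value, written as a flatMap over the characters
theorem permAux_flat (l : List Char) (h0 : l ≠ []) (h1 : l.length ≠ 1) :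
    permAux l = l.flatMap (fun c => (permAux (l.filter (fun x => !(x == c)))).map (fun j => c :: j)) := by
  rw [permAux]
  simp only [h0, h1, if_false]
  rw [← List.foldl_map,
    List.attach_map_val (l := l)
      (f := fun c => List.map (fun j => c :: j) (permAux (List.filter (fun x => !(x == c)) l))),
    List.foldl_map, PySem.List.foldl_append_eq_flatMap]
  simp

-- processing one stack entry appends exactly A's value for that node, prefixed
theorem stack_step : ∀ (n : Nat) (r : List Char), r.length ≤ n →
    ∀ (p : List Char) (st : List (List Char × List Char)) (out : List (List Char)),
      permStack ((p, r) :: st) out = permStack st (out ++ (permAux r).map (fun j => p ++ j)) := by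
  intro n
  induction n with
  | zero =>
    intro r hr p st out
    have : r = [] := List.eq_nil_of_length_eq_zero (by omega)
    subst this
    rw [permStack, permAux]
    simp
  | succ n ih =>
    intro r hr p st out
    by_cases h0 : r = []
    · subst h0; rw [permStack, permAux]; simp
    · by_cases h1 : r.length = 1
      · rw [permStack, permAux]
        simp [h0, h1]
      · -- the general case: push all children, then flush them in order
        have hchild : ∀ x ∈ r.map (fun c => (p ++ [c], r.filter (fun x => !(x == c)))),
            x.2.length ≤ n := by
          intro x hx
          obtain ⟨c, hc, rfl⟩ := List.mem_map.mp hx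
          have := pvFilterLen_lt r c hc
          dsimp only
          omega
        have flush : ∀ (cs : List (List Char × List Char)), (∀ x ∈ cs, x.2.length ≤ n) →
            ∀ st out, permStack (cs ++ st) out
              = permStack st (out ++ cs.flatMap (fun x => (permAux x.2).map (fun j => x.1 ++ j))) := by
          intro cs
          induction cs with
          | nil => intro _ st out; simp
          | cons x cs ihc =>
            intro hmem st out
            obtain ⟨q, c⟩ := x
            rw [List.cons_append, ih c (hmem _ (List.mem_cons_self ..)) q,
              ihc (fun y hy => hmem y (List.mem_cons_of_mem _ hy))]
            simp [List.append_assoc]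
        rw [permStack]
        simp only [h0, h1, if_false]
        rw [flush _ hchild, permAux_flat r h0 h1]
        simp [List.flatMap_map, List.map_flatMap, List.map_map, Function.comp_def]

-- ===== VERDICT (by name: the statement is the Claim_ definition above) =====
theorem perm_gen_lex_spec : Claim_equal_perm_gen_lex := by
  intro a _
  unfold Spec_perm_gen_lex perm_gen_lex perm_gen_lex_alt
  rw [stack_step a.toList.length a.toList (le_refl _), permStack]
  simp
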